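-- pv_equiv track=rewrite | github.com/koba925/alds | atcoder/ABC300/D.py | aabcc
-- ===== SOURCE A (Python) =====
-- def primes_below(limit):
--     primes, is_prime = [], [True] * limit
--     for n in range(2, limit):
--         if not is_prime[n]: continue
--         primes.append(n)
--         for m in range(2 * n, limit, n):
--             is_prime[m] = False
--     return primes
--
-- def aabcc(N):
--     prime_limit = 1000000
--     primes = primes_below(prime_limit)
--     nprime = len(primes)
--
--     ans = 0
--     for ia in range(0, nprime - 2):
--         a = primes[ia]
--         for ib in range(ia + 1, nprime - 1):
--             b = primes[ib]
--             aab = a ** 2 * b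
--             if aab * primes[ib + 1] ** 2 > N:
--                 break
--             for ic in range(ib + 1, nprime):
--                 c = primes[ic]
--                 if aab * c ** 2 <= N:
--                     ans += 1
--                 else:
--                     break
--     return ans
-- ===== SOURCE B (Python) =====
-- def primes_below(limit):
--     primes, is_prime = [], [True] * limit
--     for n in range(2, limit):
--         if not is_prime[n]: continue
--         primes.append(n)
--         for m in range(2 * n, limit, n):
--             is_prime[m] = False
--     return primes
--
-- def _bisect_right(ps, x, lo, hi):
--     while lo < hi:
--         mid = (lo + hi) // 2
--         if ps[mid] <= x:
--             lo = mid + 1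
--         else:
--             hi = mid
--     return lo
--
-- def aabcc(N):
--     # Regrouped enumeration: iterate over the OUTER pair (a, c) and count the
--     # middle primes b in (a, c) with b <= N // (a*a*c*c) by binary search.
--     primes = primes_below(1000000)
--     n = len(primes)
--     ans = 0
--     for ia in range(0, n - 2):
--         a2 = primes[ia] * primes[ia]
--         bmin = primes[ia + 1]
--         for ic in range(ia + 2, n):
--             cc = primes[ic] * primes[ic]
--             if a2 * bmin * cc > N:
--                 break
--             ans += _bisect_right(primes, N // (a2 * cc), ia + 1, ic) - (ia + 1)
--     return ans
-- ===== Notes on version B (the rewrite author's own statement) =====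
-- stated objective: alternative
-- what changed: B regroups the enumeration: instead of A's loops over (a,b) with an inner linear scan over c, B loops over the outer pair (a,c) and counts the admissible middle primes b at once by binary search for the largest prime <= N//(a^2*c^2); the shared million-sieve dominates wall-clock, so no speed is claimed.
import Mathlib
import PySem

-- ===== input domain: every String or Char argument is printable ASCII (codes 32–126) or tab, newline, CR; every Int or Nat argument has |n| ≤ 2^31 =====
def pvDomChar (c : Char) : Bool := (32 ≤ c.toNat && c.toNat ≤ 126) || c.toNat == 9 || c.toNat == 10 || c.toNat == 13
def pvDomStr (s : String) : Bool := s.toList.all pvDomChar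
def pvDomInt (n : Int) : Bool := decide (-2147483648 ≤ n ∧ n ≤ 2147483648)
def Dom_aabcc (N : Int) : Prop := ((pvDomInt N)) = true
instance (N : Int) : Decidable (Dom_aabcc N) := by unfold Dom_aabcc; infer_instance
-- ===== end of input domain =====

-- B regroups the enumeration: A scans c for each pair (a,b); B iterates over the
-- pair (a,c) and counts the middle primes b by binary search (no speed claim: the
-- shared million-sieve dominates).

-- ===== PORT A =====
-- primes_below: inner 'for m in range(2*n, limit, n)' marking loop (fuel = limit bounds m)
def markM : Nat → Array Bool → Nat → Nat → Nat → Array Bool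
  | 0, isp, _, _, _ => isp
  | fuel+1, isp, m, step, limit =>
    if m < limit then markM fuel (isp.setIfInBounds m false) (m + step) step limit else isp

-- primes_below: outer 'for n in range(2, limit)' loop (fuel = limit bounds n)
def sieveA : Nat → Nat → Nat → Array Bool → Array Int → Array Int
  | 0, _, _, _, primes => primes
  | fuel+1, n, limit, isp, primes =>
    if n < limit then
      if isp.getD n false then
        sieveA fuel (n+1) limit (markM limit isp (2*n) n limit) (primes.push (n:Int))
      else sieveA fuel (n+1) limit isp primes
    else primes

def primesBelow (limit : Nat) : Array Int :=
  sieveA limit 2 limit (Array.replicate limit true) #[]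

-- A's 'for ic in range(ib+1, nprime)' counting loop with break
def icLoop (ps : Array Int) (N aab : Int) (n : Nat) : Nat → Int → Int
  | ic, ans =>
    if _h : ic < n then
      if aab * (ps.getD ic 0)^2 ≤ N then icLoop ps N aab n (ic+1) (ans+1) else ans
    else ans
termination_by ic => n - ic
decreasing_by omega

-- A's 'for ib in range(ia+1, nprime-1)' loop with break
def ibLoopA (ps : Array Int) (N a : Int) (n : Nat) : Nat → Int → Int
  | ib, ans =>
    if _h : ib < n - 1 then
      let aab := a^2 * ps.getD ib 0
      if aab * (ps.getD (ib+1) 0)^2 > N then ans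
      else ibLoopA ps N a n (ib+1) (icLoop ps N aab n (ib+1) ans)
    else ans
termination_by ib => n - 1 - ib
decreasing_by omega

-- A's 'for ia in range(0, nprime-2)' loop
def iaLoopA (ps : Array Int) (N : Int) (n : Nat) : Nat → Int → Int
  | ia, ans =>
    if _h : ia < n - 2 then
      iaLoopA ps N n (ia+1) (ibLoopA ps N (ps.getD ia 0) n (ia+1) ans)
    else ans
termination_by ia => n - 2 - ia
decreasing_by omega

def aabcc (N : Int) : Int :=
  let primes := primesBelow 1000000
  iaLoopA primes N primes.size 0 0

-- ===== PORT B =====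
-- B's '_bisect_right' while-loop
def bisectR (ps : Array Int) (x : Int) : Nat → Nat → Nat
  | lo, hi =>
    if _h : lo < hi then
      let mid := (lo + hi) / 2
      if ps.getD mid 0 ≤ x then bisectR ps x (mid+1) hi else bisectR ps x lo mid
    else lo
termination_by lo hi => hi - lo
decreasing_by all_goals omega

-- B's 'for ic in range(ia+2, n)' loop with break; counts b-candidates per c
def icLoopB (ps : Array Int) (N a2 bmin : Int) (ia n : Nat) : Nat → Int → Int
  | ic, ans =>
    if _h : ic < n then
      let cc := ps.getD ic 0 * ps.getD ic 0
      if a2 * bmin * cc > N then ans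
      else icLoopB ps N a2 bmin ia n (ic+1)
        (ans + ((bisectR ps (PySem.Int.floordiv N (a2 * cc)) (ia+1) ic : Nat) : Int) - ((ia : Int)+1))
    else ans
termination_by ic => n - ic
decreasing_by omega

-- B's 'for ia in range(0, n - 2)' loop
def iaLoopB (ps : Array Int) (N : Int) (n : Nat) : Nat → Int → Int
  | ia, ans =>
    if _h : ia < n - 2 then
      iaLoopB ps N n (ia+1)
        (icLoopB ps N (ps.getD ia 0 * ps.getD ia 0) (ps.getD (ia+1) 0) ia n (ia+2) ans)
    else ans
termination_by ia => n - 2 - ia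
decreasing_by omega

def aabcc_alt (N : Int) : Int :=
  let primes := primesBelow 1000000
  iaLoopB primes N primes.size 0 0

-- ===== PRECONDITION & SPEC =====
def Spec_aabcc (N : Int) (out : Int) : Prop := out = aabcc_alt N
instance (N : Int) (out : Int) : Decidable (Spec_aabcc N out) := by unfold Spec_aabcc; infer_instance

-- ===== CLAIM (what is proved, stated in full; the proofs are below) =====
def Claim_equal_aabcc : Prop := ∀ (N : Int), Dom_aabcc N → Spec_aabcc N (aabcc N)

-- ===== LEMMAS AND PROOFS =====

-- the sieve's output is sorted and its members are ≥ 2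
def SortedNN (ps : Array Int) : Prop :=
  ps.toList.Pairwise (· ≤ ·) ∧ ∀ x ∈ ps.toList, 2 ≤ x

-- the triple indicator both counts reduce to (exactly A's test expression)
def tind (ps : Array Int) (N : Int) (ia ib ic : Nat) : Int :=
  if (ps.getD ia 0)^2 * ps.getD ib 0 * (ps.getD ic 0)^2 ≤ N then 1 else 0

theorem sieveA_inv : ∀ (fuel n limit : Nat) (isp : Array Bool) (primes : Array Int),
    2 ≤ n → primes.toList.Pairwise (· ≤ ·) → (∀ x ∈ primes.toList, 2 ≤ x ∧ x < (n:Int)) →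
    SortedNN (sieveA fuel n limit isp primes)
  | 0, n, limit, isp, primes, _, hs, hb => ⟨hs, fun x hx => (hb x hx).1⟩
  | fuel+1, n, limit, isp, primes, hn, hs, hb => by
      rw [sieveA]
      split
      · split
        · apply sieveA_inv fuel (n+1) limit _ (primes.push (n:Int)) (by omega)
          · rw [Array.toList_push, List.pairwise_append]
            refine ⟨hs, List.pairwise_singleton _ _, ?_⟩
            intro a ha b hb'
            rw [List.mem_singleton] at hb'
            subst hb'
            exact le_of_lt (hb a ha).2
          · intro x hx
            rw [Array.toList_push, List.mem_append, List.mem_singleton] at hx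
            rcases hx with hx | hx
            · exact ⟨(hb x hx).1, by have := (hb x hx).2; push_cast; push_cast at this; omega⟩
            · subst hx; exact ⟨by exact_mod_cast hn, by push_cast; omega⟩
        · exact sieveA_inv fuel (n+1) limit isp primes (by omega) hs
            (fun x hx => ⟨(hb x hx).1, by have := (hb x hx).2; push_cast; push_cast at this; omega⟩)
      · exact ⟨hs, fun x hx => (hb x hx).1⟩

theorem primesBelow_sortedNN (limit : Nat) : SortedNN (primesBelow limit) := by
  apply sieveA_inv <;> simp

theorem getD_eq (ps : Array Int) (i : Nat) (h : i < ps.size) :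
    ps.getD i 0 = ps.toList[i]'(by simpa using h) := by
  simp [Array.getD, h]

theorem getInternal_eq_getD (ps : Array Int) (i : Nat) (h : i < ps.size) :
    ps.getInternal i h = ps.getD i 0 := by
  simp [Array.getD, h]

theorem getD_nonneg (ps : Array Int) (h : SortedNN ps) (i : Nat) : 0 ≤ ps.getD i 0 := by
  by_cases hi : i < ps.size
  · rw [getD_eq ps i hi]
    have := h.2 _ (List.getElem_mem (l := ps.toList) (by simpa using hi))
    omega
  · simp [Array.getD, hi]

theorem getD_two_le (ps : Array Int) (h : SortedNN ps) (i : Nat) (hi : i < ps.size) :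
    2 ≤ ps.getD i 0 := by
  rw [getD_eq ps i hi]
  exact h.2 _ (List.getElem_mem _)

theorem getD_mono (ps : Array Int) (h : SortedNN ps) {i j : Nat} (hij : i ≤ j)
    (hj : j < ps.size) : ps.getD i 0 ≤ ps.getD j 0 := by
  rw [getD_eq ps i (lt_of_le_of_lt hij hj), getD_eq ps j hj]
  rcases Nat.lt_or_ge i j with hlt | hge
  · exact (List.pairwise_iff_getElem.mp h.1) i j (by simpa using lt_of_le_of_lt hij hj) (by simpa using hj) hlt
  · have : i = j := le_antisymm hij hge
    subst this; exact le_refl _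

-- monotone predicate along the sorted array
theorem pred_down (ps : Array Int) (h : SortedNN ps) (N aab : Int) (haab : 0 ≤ aab)
    {i j : Nat} (hij : i ≤ j) (hj : j < ps.size)
    (hP : aab * (ps.getD j 0)^2 ≤ N) : aab * (ps.getD i 0)^2 ≤ N := by
  have h1 : 0 ≤ ps.getD i 0 := getD_nonneg ps h i
  have h2 : ps.getD i 0 ≤ ps.getD j 0 := getD_mono ps h hij hj
  have h3 : (ps.getD i 0)^2 ≤ (ps.getD j 0)^2 := by nlinarith
  calc aab * (ps.getD i 0)^2 ≤ aab * (ps.getD j 0)^2 := mul_le_mul_of_nonneg_left h3 haab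
    _ ≤ N := hP

-- ---- A side: the three loops compute the canonical triple sum ----

theorem icLoop_sum (ps : Array Int) (N aab : Int) (h : SortedNN ps) (haab : 0 ≤ aab) :
    ∀ k ic ans, ps.size - ic ≤ k →
    icLoop ps N aab ps.size ic ans
      = ans + ∑ j ∈ Finset.Ico ic ps.size, (if aab * (ps.getD j 0)^2 ≤ N then (1:Int) else 0) := by
  intro k
  induction k with
  | zero =>
    intro ic ans hk
    rw [icLoop]
    have hge : ¬ ic < ps.size := by omega
    rw [dif_neg hge, Finset.Ico_eq_empty (by omega), Finset.sum_empty, add_zero]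
  | succ k ih =>
    intro ic ans hk
    rw [icLoop]
    split
    · rename_i hlt
      split
      · rename_i hP
        rw [getInternal_eq_getD ps ic hlt] at hP
        rw [ih (ic+1) (ans+1) (by omega),
            Finset.sum_eq_sum_Ico_succ_bot hlt, if_pos hP]
        ring
      · rename_i hP
        rw [getInternal_eq_getD ps ic hlt] at hP
        rw [Finset.sum_eq_zero, add_zero]
        intro j hj
        rw [Finset.mem_Ico] at hj
        refine if_neg (fun hc => hP ?_)
        exact pred_down ps h N aab haab hj.1 hj.2 hc
    · rename_i hge
      rw [Finset.Ico_eq_empty (by omega), Finset.sum_empty, add_zero]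

theorem ibLoopA_sum (ps : Array Int) (N a : Int) (h : SortedNN ps) :
    ∀ k ib ans, ps.size - ib ≤ k →
    ibLoopA ps N a ps.size ib ans
      = ans + ∑ ib' ∈ Finset.Ico ib ps.size, ∑ ic ∈ Finset.Ico (ib'+1) ps.size,
          (if a^2 * ps.getD ib' 0 * (ps.getD ic 0)^2 ≤ N then (1:Int) else 0) := by
  intro k
  induction k with
  | zero =>
    intro ib ans hk
    rw [ibLoopA]
    have hge : ¬ ib < ps.size - 1 := by omega
    rw [dif_neg hge, Finset.Ico_eq_empty (by omega), Finset.sum_empty, add_zero]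
  | succ k ih =>
    intro ib ans hk
    rw [ibLoopA]
    split
    · rename_i hlt
      dsimp only
      split
      · rename_i hbrk
        -- break: every remaining term is 0
        rw [Finset.sum_eq_zero, add_zero]
        intro ib' hib'
        rw [Finset.mem_Ico] at hib'
        apply Finset.sum_eq_zero
        intro ic hic
        rw [Finset.mem_Ico] at hic
        refine if_neg (fun hc => absurd hbrk (not_lt.mpr ?_))
        have hb1 : ps.getD ib 0 ≤ ps.getD ib' 0 := getD_mono ps h hib'.1 hib'.2
        have hc1 : ps.getD (ib+1) 0 ≤ ps.getD ic 0 := getD_mono ps h (by omega) hic.2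
        have p1 : 0 ≤ ps.getD ib 0 := getD_nonneg ps h ib
        have p2 : 0 ≤ ps.getD (ib+1) 0 := getD_nonneg ps h (ib+1)
        have p3 : 0 ≤ ps.getD ic 0 := getD_nonneg ps h ic
        have hb0 : 0 ≤ ps.getD ib' 0 := le_trans p1 hb1
        have e1 : a^2 * ps.getD ib 0 ≤ a^2 * ps.getD ib' 0 :=
          mul_le_mul_of_nonneg_left hb1 (sq_nonneg a)
        have e2 : ps.getD (ib+1) 0 ^ 2 ≤ ps.getD ic 0 ^ 2 := by nlinarith
        have e3 : a^2 * ps.getD ib 0 * ps.getD (ib+1) 0 ^ 2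
            ≤ a^2 * ps.getD ib' 0 * ps.getD ic 0 ^ 2 :=
          mul_le_mul e1 e2 (sq_nonneg _) (mul_nonneg (sq_nonneg a) hb0)
        linarith
      · rename_i hbrk
        rw [ih (ib+1) _ (by omega),
            icLoop_sum ps N (a^2 * ps.getD ib 0) h
              (mul_nonneg (sq_nonneg a) (getD_nonneg ps h ib)) (ps.size) (ib+1) ans (by omega),
            Finset.sum_eq_sum_Ico_succ_bot (show ib < ps.size by omega)]
        ring
    · rename_i hge
      -- ib ≥ size-1: the remaining (at most one) outer term has an empty inner range
      rw [Finset.sum_eq_zero, add_zero]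
      intro ib' hib'
      rw [Finset.mem_Ico] at hib'
      rw [Finset.Ico_eq_empty (by omega), Finset.sum_empty]

theorem iaLoopA_sum (ps : Array Int) (N : Int) (h : SortedNN ps) :
    ∀ k ia ans, ps.size - ia ≤ k →
    iaLoopA ps N ps.size ia ans
      = ans + ∑ ia' ∈ Finset.Ico ia ps.size, ∑ ib ∈ Finset.Ico (ia'+1) ps.size,
          ∑ ic ∈ Finset.Ico (ib+1) ps.size, tind ps N ia' ib ic := by
  intro k
  induction k with
  | zero =>
    intro ia ans hk
    rw [iaLoopA]
    have hge : ¬ ia < ps.size - 2 := by omega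
    rw [dif_neg hge, Finset.Ico_eq_empty (by omega), Finset.sum_empty, add_zero]
  | succ k ih =>
    intro ia ans hk
    rw [iaLoopA]
    split
    · rename_i hlt
      rw [ih (ia+1) _ (by omega),
          ibLoopA_sum ps N (ps.getD ia 0) h (ps.size) (ia+1) ans (by omega),
          Finset.sum_eq_sum_Ico_succ_bot (show ia < ps.size by omega)]
      simp only [tind]
      ring
    · rename_i hge
      -- ia ≥ size-2: every remaining term vanishes (inner ic-range is empty)
      rw [Finset.sum_eq_zero, add_zero]
      intro ia' hia'
      rw [Finset.mem_Ico] at hia'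
      apply Finset.sum_eq_zero
      intro ib hib
      rw [Finset.mem_Ico] at hib
      rw [Finset.Ico_eq_empty (by omega), Finset.sum_empty]

-- ---- B side ----

theorem bisectR_sum (ps : Array Int) (x : Int) (h : SortedNN ps) :
    ∀ k lo hi, hi - lo ≤ k → lo ≤ hi → hi ≤ ps.size →
    ((bisectR ps x lo hi : Nat) : Int) - lo
      = ∑ j ∈ Finset.Ico lo hi, (if ps.getD j 0 ≤ x then (1:Int) else 0) := by
  intro k
  induction k with
  | zero =>
    intro lo hi hk hle hsz
    have : lo = hi := by omega
    subst this
    rw [bisectR, dif_neg (lt_irrefl lo), Finset.Ico_self, Finset.sum_empty, sub_self]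
  | succ k ih =>
    intro lo hi hk hle hsz
    rw [bisectR]
    split
    · rename_i hlt
      have hmid : lo ≤ (lo + hi) / 2 ∧ (lo + hi) / 2 < hi := by omega
      dsimp only
      split
      · rename_i hP
        rw [← Finset.sum_Ico_consecutive _ (show lo ≤ (lo+hi)/2+1 by omega) (show (lo+hi)/2+1 ≤ hi by omega)]
        have h1 : ∑ j ∈ Finset.Ico lo ((lo+hi)/2+1), (if ps.getD j 0 ≤ x then (1:Int) else 0)
            = (((lo+hi)/2+1 - lo : Nat) : Int) := by
          rw [Finset.sum_congr rfl (fun j hj => ?_), Finset.sum_const, Nat.card_Ico,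
              nsmul_eq_mul, mul_one]
          rw [Finset.mem_Ico] at hj
          exact if_pos (le_trans (getD_mono ps h (by omega) (by omega)) hP)
        rw [h1, ← ih ((lo+hi)/2+1) hi (by omega) (by omega) hsz]
        push_cast
        omega
      · rename_i hP
        rw [← Finset.sum_Ico_consecutive _ (show lo ≤ (lo+hi)/2 by omega) (show (lo+hi)/2 ≤ hi by omega)]
        have h0 : ∑ j ∈ Finset.Ico ((lo+hi)/2) hi, (if ps.getD j 0 ≤ x then (1:Int) else 0) = 0 := by
          apply Finset.sum_eq_zero
          intro j hj
          rw [Finset.mem_Ico] at hj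
          exact if_neg (fun hc => hP (le_trans (getD_mono ps h hj.1 (by omega)) hc))
        rw [h0, add_zero, ← ih lo ((lo+hi)/2) (by omega) (by omega) (by omega)]
    · rename_i hge
      have : lo = hi := by omega
      subst this
      rw [Finset.Ico_self, Finset.sum_empty, sub_self]

-- the bisect count at fixed (ia, ic) equals the row of triple indicators
theorem bisect_row (ps : Array Int) (N : Int) (h : SortedNN ps) (ia ic : Nat)
    (hia : ia + 1 ≤ ic) (hic : ic < ps.size) :
    ((bisectR ps (PySem.Int.floordiv N (ps.getD ia 0 * ps.getD ia 0 * (ps.getD ic 0 * ps.getD ic 0)))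
        (ia+1) ic : Nat) : Int) - ((ia : Int)+1)
      = ∑ ib ∈ Finset.Ico (ia+1) ic, tind ps N ia ib ic := by
  have hpos : 0 < ps.getD ia 0 * ps.getD ia 0 * (ps.getD ic 0 * ps.getD ic 0) := by
    have h1 := getD_two_le ps h ia (by omega)
    have h2 := getD_two_le ps h ic hic
    have h1' : (0:Int) < ps.getD ia 0 := by omega
    have h2' : (0:Int) < ps.getD ic 0 := by omega
    exact mul_pos (mul_pos h1' h1') (mul_pos h2' h2')
  have hmain := bisectR_sum ps
      (PySem.Int.floordiv N (ps.getD ia 0 * ps.getD ia 0 * (ps.getD ic 0 * ps.getD ic 0)))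
      h ic (ia+1) ic (by omega) hia (by omega)
  have hcast : (((ia+1 : Nat) : Int)) = ((ia : Int)+1) := by push_cast; ring
  rw [hcast] at hmain
  rw [hmain]
  apply Finset.sum_congr rfl
  intro ib hib
  rw [Finset.mem_Ico] at hib
  unfold tind
  congr 1
  rw [eq_iff_iff, PySem.Int.le_floordiv_iff_mul_le hpos,
      show ps.getD ib 0 * (ps.getD ia 0 * ps.getD ia 0 * (ps.getD ic 0 * ps.getD ic 0))
          = ps.getD ia 0 ^ 2 * ps.getD ib 0 * ps.getD ic 0 ^ 2 from by ring]

theorem icLoopB_sum (ps : Array Int) (N : Int) (h : SortedNN ps) (ia : Nat)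
    (hia : ia + 1 < ps.size) :
    ∀ k ic ans, ps.size - ic ≤ k → ia + 1 ≤ ic →
    icLoopB ps N (ps.getD ia 0 * ps.getD ia 0) (ps.getD (ia+1) 0) ia ps.size ic ans
      = ans + ∑ ic' ∈ Finset.Ico ic ps.size, ∑ ib ∈ Finset.Ico (ia+1) ic', tind ps N ia ib ic' := by
  intro k
  induction k with
  | zero =>
    intro ic ans hk hlo
    rw [icLoopB]
    have hge : ¬ ic < ps.size := by omega
    rw [dif_neg hge, Finset.Ico_eq_empty (by omega), Finset.sum_empty, add_zero]
  | succ k ih =>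
    intro ic ans hk hlo
    rw [icLoopB]
    split
    · rename_i hlt
      dsimp only
      split
      · rename_i hbrk
        -- break: every remaining row is all-zero
        rw [Finset.sum_eq_zero, add_zero]
        intro ic' hic'
        rw [Finset.mem_Ico] at hic'
        apply Finset.sum_eq_zero
        intro ib hib
        rw [Finset.mem_Ico] at hib
        unfold tind
        rw [getInternal_eq_getD ps (ia+1) hia, getInternal_eq_getD ps ic hlt] at hbrk
        refine if_neg (fun hc => absurd hbrk (not_lt.mpr ?_))
        have hb1 : ps.getD (ia+1) 0 ≤ ps.getD ib 0 := getD_mono ps h hib.1 (by omega)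
        have hc1 : ps.getD ic 0 ≤ ps.getD ic' 0 := getD_mono ps h hic'.1 hic'.2
        have p0 : 0 ≤ ps.getD ia 0 := getD_nonneg ps h ia
        have p1 : 0 ≤ ps.getD (ia+1) 0 := getD_nonneg ps h (ia+1)
        have p2 : 0 ≤ ps.getD ic 0 := getD_nonneg ps h ic
        have hb0 : 0 ≤ ps.getD ib 0 := le_trans p1 hb1
        have q0 : 0 ≤ ps.getD ia 0 * ps.getD ia 0 := mul_nonneg p0 p0
        have e1 : ps.getD ia 0 * ps.getD ia 0 * ps.getD (ia+1) 0
            ≤ ps.getD ia 0 * ps.getD ia 0 * ps.getD ib 0 :=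
          mul_le_mul_of_nonneg_left hb1 q0
        have e2 : ps.getD ic 0 * ps.getD ic 0 ≤ ps.getD ic' 0 * ps.getD ic' 0 := by nlinarith
        have e3 : ps.getD ia 0 * ps.getD ia 0 * ps.getD (ia+1) 0 * (ps.getD ic 0 * ps.getD ic 0)
            ≤ ps.getD ia 0 * ps.getD ia 0 * ps.getD ib 0 * (ps.getD ic' 0 * ps.getD ic' 0) :=
          mul_le_mul e1 e2 (mul_nonneg p2 p2) (mul_nonneg q0 hb0)
        have e4 : ps.getD ia 0 ^ 2 * ps.getD ib 0 * ps.getD ic' 0 ^ 2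
            = ps.getD ia 0 * ps.getD ia 0 * ps.getD ib 0 * (ps.getD ic' 0 * ps.getD ic' 0) := by
          ring
        linarith
      · rename_i hbrk
        simp only [getInternal_eq_getD]
        rw [ih (ic+1) _ (by omega) (by omega),
            Finset.sum_eq_sum_Ico_succ_bot hlt,
            ← bisect_row ps N h ia ic hlo hlt]
        ring
    · rename_i hge
      rw [Finset.Ico_eq_empty (by omega), Finset.sum_empty, add_zero]

theorem iaLoopB_sum (ps : Array Int) (N : Int) (h : SortedNN ps) :
    ∀ k ia ans, ps.size - ia ≤ k →
    iaLoopB ps N ps.size ia ans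
      = ans + ∑ ia' ∈ Finset.Ico ia ps.size, ∑ ic ∈ Finset.Ico (ia'+1) ps.size,
          ∑ ib ∈ Finset.Ico (ia'+1) ic, tind ps N ia' ib ic := by
  intro k
  induction k with
  | zero =>
    intro ia ans hk
    rw [iaLoopB]
    have hge : ¬ ia < ps.size - 2 := by omega
    rw [dif_neg hge, Finset.Ico_eq_empty (by omega), Finset.sum_empty, add_zero]
  | succ k ih =>
    intro ia ans hk
    rw [iaLoopB]
    split
    · rename_i hlt
      have hpeel : ∑ ic ∈ Finset.Ico (ia+1) ps.size, ∑ ib ∈ Finset.Ico (ia+1) ic, tind ps N ia ib ic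
          = ∑ ic ∈ Finset.Ico (ia+2) ps.size, ∑ ib ∈ Finset.Ico (ia+1) ic, tind ps N ia ib ic := by
        rw [Finset.sum_eq_sum_Ico_succ_bot (show ia+1 < ps.size by omega),
            Finset.Ico_self, Finset.sum_empty, zero_add]
      rw [ih (ia+1) _ (by omega),
          icLoopB_sum ps N h ia (by omega) (ps.size) (ia+2) ans (by omega) (by omega),
          Finset.sum_eq_sum_Ico_succ_bot (show ia < ps.size by omega), hpeel]
      ring
    · rename_i hge
      rw [Finset.sum_eq_zero, add_zero]
      intro ia' hia'
      rw [Finset.mem_Ico] at hia'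
      apply Finset.sum_eq_zero
      intro ic hic
      rw [Finset.mem_Ico] at hic
      rw [Finset.Ico_eq_empty (by omega), Finset.sum_empty]

-- ===== VERDICT (by name: the statement is the Claim_ definition above) =====
theorem aabcc_spec : Claim_equal_aabcc := by
  intro N _
  unfold Spec_aabcc
  have key : ∀ ps : Array Int, SortedNN ps → iaLoopA ps N ps.size 0 0 = iaLoopB ps N ps.size 0 0 := by
    intro ps h
    rw [iaLoopA_sum ps N h ps.size 0 0 le_rfl,
        iaLoopB_sum ps N h ps.size 0 0 le_rfl]
    congr 1
    exact Finset.sum_congr rfl fun ia _ =>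
      Finset.sum_Ico_Ico_comm' (ia+1) ps.size (fun ib ic => tind ps N ia ib ic)
  show aabcc N = aabcc_alt N
  simp only [aabcc, aabcc_alt]
  exact key _ (primesBelow_sortedNN 1000000)
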